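-- pv_equiv track=rewrite | github.com/Jakub-Domogala/LeetCode | 1.easy/1844. Replace All Digits with Characters.py | replaceDigits
-- ===== SOURCE A (Python) =====
-- def replaceDigits(s: str) -> str:
--     result = ""
--     n = len(s)
--     if n%2 == 0:
--         for i in range(0,len(s),2):
--             result += s[i] + chr(ord(s[i]) + int(s[i+1]))
--     else:
--         for i in range(0,len(s)-1,2):
--             result += s[i] + chr(ord(s[i]) + int(s[i+1]))
--         result += s[-1]
--     return result
-- ===== SOURCE B (Python) =====
-- def replaceDigits(s: str) -> str:
--     out = []
--     for i, c in enumerate(s):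
--         if i % 2 == 0:
--             out.append(c)
--         else:
--             out.append(chr(ord(s[i - 1]) + int(c)))
--     return "".join(out)
-- ===== Notes on version B (the rewrite author's own statement) =====
-- stated objective: simpler
-- what changed: Single per-character pass keyed on index parity (enumerate + join) instead of A's stride-2 pair loop with separate even/odd-length branches and a trailing-char special case.
import Mathlib
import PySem

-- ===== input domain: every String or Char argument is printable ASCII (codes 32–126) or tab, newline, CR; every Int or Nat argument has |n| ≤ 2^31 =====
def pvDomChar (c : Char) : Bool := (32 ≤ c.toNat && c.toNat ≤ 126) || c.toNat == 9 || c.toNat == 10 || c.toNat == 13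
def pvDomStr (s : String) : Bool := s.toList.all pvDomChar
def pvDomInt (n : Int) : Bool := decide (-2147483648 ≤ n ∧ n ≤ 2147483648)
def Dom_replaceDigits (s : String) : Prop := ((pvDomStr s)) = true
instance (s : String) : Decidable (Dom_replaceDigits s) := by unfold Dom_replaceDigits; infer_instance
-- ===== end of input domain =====

-- B replaces A's stride-2 pair loop (with even/odd-length branches and a trailing-char
-- special case) by a single per-character pass keyed on index parity; same return value.
-- Pre_ excludes inputs on which A raises ValueError (a non-digit at an odd index).

-- ===== PORT A =====
-- chr(ord(a) + int(b)); int of a one-char string via PySem.Int.ofStr? (exact; Pre_ keeps it a digit)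
def pvShift (a b : Char) : Char :=
  Char.ofNat (((a.toNat : Int) + ((PySem.Int.ofStr? (String.ofList [b])).getD 0)).toNat)

-- A's stride-2 loop: each step reads the pair s[i], s[i+1]; the odd-length trailing
-- character (A's else-branch `result += s[-1]`) is the singleton base case.
def replaceDigitsGoA : List Char → List Char
  | [] => []
  | [c] => [c]
  | a :: b :: rest => a :: pvShift a b :: replaceDigitsGoA rest

def replaceDigits (s : String) : String := String.ofList (replaceDigitsGoA s.toList)

-- ===== PORT B =====
-- body of B's loop: for (i, c), keep c at even i, else shift s[i-1] by int(c)
def pvPick (cs : List Char) (p : Int × Char) : Char :=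
  if p.1 % 2 == 0 then p.2
  else pvShift ((PySem.List.pyGet? cs (p.1 - 1)).getD ' ') p.2

def replaceDigits_alt (s : String) : String :=
  String.ofList ((PySem.List.enumerate s.toList 0).map (pvPick s.toList))

-- ===== PRECONDITION & SPEC =====
-- Pre_ excludes exactly the inputs on which the Python A raises ValueError
-- (int(s[i+1]) with a non-digit character at an odd index); B raises there too.
def Pre_replaceDigits (s : String) : Prop :=
  ∀ i ∈ List.range s.toList.length, i % 2 = 1 → (s.toList.getD i ' ').isDigit = true
instance (s : String) : Decidable (Pre_replaceDigits s) := by unfold Pre_replaceDigits; infer_instance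
def pvWitness_replaceDigits : String := "a1c1e2"
def Spec_replaceDigits (s : String) (out : String) : Prop := out = replaceDigits_alt s
instance (s : String) (out : String) : Decidable (Spec_replaceDigits s out) := by unfold Spec_replaceDigits; infer_instance

-- ===== CLAIM (what is proved, stated in full; the proofs are below) =====
def Claim_equal_replaceDigits : Prop := ∀ (s : String), Dom_replaceDigits s → Pre_replaceDigits s → Spec_replaceDigits s (replaceDigits s)

-- ===== LEMMAS AND PROOFS =====
lemma pvKey (rest : List Char) : ∀ (pre : List Char), pre.length % 2 = 0 →
    (PySem.List.enumerate rest (pre.length : Int)).map (pvPick (pre ++ rest)) =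
      replaceDigitsGoA rest := by
  induction rest using replaceDigitsGoA.induct with
  | case1 => intro pre _; simp [PySem.List.enumerate_nil, replaceDigitsGoA]
  | case2 c =>
      intro pre hpre
      have h2 : ((pre.length : Int)) % 2 == 0 := by
        simp only [beq_iff_eq]; omega
      simp [PySem.List.enumerate_cons, PySem.List.enumerate_nil, replaceDigitsGoA,
        pvPick, h2]
  | case3 a b rest ih =>
      intro pre hpre
      have h2 : ((pre.length : Int)) % 2 == 0 := by
        simp only [beq_iff_eq]; omega
      have h3 : (((pre.length : Int) + 1) % 2 == 0) = false := by
        simp only [beq_eq_false_iff_ne, ne_eq]; omega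
      have hget : PySem.List.pyGet? (pre ++ a :: b :: rest) ((pre.length : Int) + 1 - 1)
          = some a := by
        have : (pre.length : Int) + 1 - 1 = ((pre.length : Nat) : Int) := by omega
        rw [this, PySem.List.pyGet?_natCast]
        simp
      have htail := ih (pre ++ [a, b]) (by simp; omega)
      have hlen : ((pre ++ [a, b]).length : Int) = (pre.length : Int) + 1 + 1 := by
        simp; omega
      have hcs : (pre ++ [a, b]) ++ rest = pre ++ a :: b :: rest := by simp
      rw [hlen, hcs] at htail
      simp only [PySem.List.enumerate_cons, List.map_cons, replaceDigitsGoA, pvPick,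
        h2, h3, hget, Option.getD_some, htail]
      simp

-- ===== VERDICT (by name: the statement is the Claim_ definition above) =====
theorem replaceDigits_spec : Claim_equal_replaceDigits := by
  intro s _ _
  unfold Spec_replaceDigits replaceDigits replaceDigits_alt
  have h := pvKey s.toList [] (by simp)
  simp only [List.length_nil, Nat.cast_zero, List.nil_append] at h
  exact congrArg String.ofList h.symm
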